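-- pv_equiv track=rewrite | github.com/Vladimir-ai/Semestr_8 | Computer_security/Task3/task_3.py | compute_aperiodic_len
-- ===== SOURCE A (Python) =====
-- def get_next(u: int, m: int, p: int):
--   u_next = u * m % p
--   r_next = u_next / p
--   return u_next, r_next
--
-- def compute_aperiodic_len(u0: int, m: int, p: int):
--   elem_dict = dict()
--   aperiodic_len = 0
--   current_idx = 0
--   u = u0
--
--   while True:
--     if u not in elem_dict.keys():
--       elem_dict[u] = current_idx
--     else:
--       aperiodic_len = len(elem_dict) - elem_dict[u]
--       break
--
--     current_idx += 1
--     u, _ = get_next(u, m, p)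
--
--   return aperiodic_len, len(elem_dict)
-- ===== SOURCE B (Python) =====
-- def get_next(u, m, p):
--   u_next = u * m % p
--   r_next = u_next / p
--   return u_next, r_next
--
-- def compute_aperiodic_len(u0, m, p):
--   # Floyd's cycle detection over the same get_next iteration (no dict of seen values).
--   slow, _ = get_next(u0, m, p)
--   fast, _ = get_next(slow, m, p)
--   while slow != fast:
--     slow, _ = get_next(slow, m, p)
--     fast, _ = get_next(fast, m, p)
--     fast, _ = get_next(fast, m, p)
--   # recover tail length mu
--   mu = 0
--   slow = u0
--   while slow != fast:
--     slow, _ = get_next(slow, m, p)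
--     fast, _ = get_next(fast, m, p)
--     mu += 1
--   # measure cycle length lam
--   lam = 1
--   fast, _ = get_next(slow, m, p)
--   while slow != fast:
--     fast, _ = get_next(fast, m, p)
--     lam += 1
--   return lam, mu + lam
-- ===== Notes on version B (the rewrite author's own statement) =====
-- stated objective: alternative
-- what changed: Replaces A's dict of seen values (mapping every orbit element to its index) with Floyd's two-pointer cycle detection over the same get_next iteration: a meeting phase, a tail-length recovery phase and a cycle-length phase, using O(1) extra space instead of a dict.
import Mathlib
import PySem

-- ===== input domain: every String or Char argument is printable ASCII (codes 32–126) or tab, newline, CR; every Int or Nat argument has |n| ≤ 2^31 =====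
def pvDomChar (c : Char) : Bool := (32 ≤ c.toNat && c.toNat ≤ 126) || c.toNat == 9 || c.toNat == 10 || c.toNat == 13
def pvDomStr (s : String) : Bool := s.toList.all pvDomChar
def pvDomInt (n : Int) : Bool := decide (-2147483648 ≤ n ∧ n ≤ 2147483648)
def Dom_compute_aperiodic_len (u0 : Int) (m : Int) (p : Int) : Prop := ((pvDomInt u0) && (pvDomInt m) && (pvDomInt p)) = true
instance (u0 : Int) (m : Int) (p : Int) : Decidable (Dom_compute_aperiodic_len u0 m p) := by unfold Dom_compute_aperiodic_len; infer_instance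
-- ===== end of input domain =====

-- B replaces A's dict of seen values by Floyd's two-pointer cycle detection over the same get_next iteration (O(1) extra space instead of a dict).

-- ===== PORT A =====
-- get_next also computes 'r_next = u_next / p', a Python float that the caller discards ('u, _ = ...');
-- for p ≠ 0 (Pre_) that division returns normally, so only u_next is ported.
def get_next (u : Int) (m : Int) (p : Int) : Int := PySem.Int.mod (u * m) p

-- fuel bound for the while-loops; 2^32 exceeds any possible iteration count on Dom (the orbit repeats within |p|+1 ≤ 2^31+1 steps)
def pvFuel : Nat := 4294967296

-- the 'while True' loop of A: state (elem_dict, current_idx, u)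
def aLoop (m : Int) (p : Int) : Nat → PySem.Dict Int Int → Int → Int → Int × Int
  | 0, d, _, _ => (0, (d.size : Int))   -- fuel exhausted; unreachable under Pre_ (proved)
  | fuel+1, d, idx, u =>
    if d.contains u = false then
      aLoop m p fuel (d.insert u idx) (idx + 1) (get_next u m p)
    else
      ((d.size : Int) - d.getD u 0, (d.size : Int))   -- elem_dict[u] exists here, so getD's default is never used

def compute_aperiodic_len (u0 : Int) (m : Int) (p : Int) : Int × Int :=
  aLoop m p pvFuel PySem.Dict.empty 0 u0

-- ===== PORT B =====
-- phase 1: 'while slow != fast: slow = step(slow); fast = step(step(fast))' ; returns fast at meeting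
def floydMeet (m : Int) (p : Int) : Nat → Int → Int → Int
  | 0, _, fast => fast
  | fuel+1, slow, fast =>
    if slow ≠ fast then
      floydMeet m p fuel (get_next slow m p) (get_next (get_next fast m p) m p)
    else fast

-- phase 2: 'while slow != fast: slow = step(slow); fast = step(fast); mu += 1' ; returns (mu, slow)
def tailLoop (m : Int) (p : Int) : Nat → Int → Int → Int → Int × Int
  | 0, mu, slow, _ => (mu, slow)
  | fuel+1, mu, slow, fast =>
    if slow ≠ fast then
      tailLoop m p fuel (mu + 1) (get_next slow m p) (get_next fast m p)
    else (mu, slow)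

-- phase 3: 'while slow != fast: fast = step(fast); lam += 1' ; returns lam
def cycLoop (m : Int) (p : Int) : Nat → Int → Int → Int → Int
  | 0, lam, _, _ => lam
  | fuel+1, lam, slow, fast =>
    if slow ≠ fast then
      cycLoop m p fuel (lam + 1) slow (get_next fast m p)
    else lam

def compute_aperiodic_len_alt (u0 : Int) (m : Int) (p : Int) : Int × Int :=
  let slow := get_next u0 m p
  let fast := get_next slow m p
  let meet := floydMeet m p pvFuel slow fast
  let t := tailLoop m p pvFuel 0 u0 meet
  let lam := cycLoop m p pvFuel 1 t.2 (get_next t.2 m p)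
  (lam, t.1 + lam)

-- ===== PRECONDITION & SPEC =====
-- Pre_ excludes exactly p = 0, on which A raises ZeroDivisionError in get_next.
def Pre_compute_aperiodic_len (u0 : Int) (m : Int) (p : Int) : Prop := p ≠ 0
instance (u0 : Int) (m : Int) (p : Int) : Decidable (Pre_compute_aperiodic_len u0 m p) := by unfold Pre_compute_aperiodic_len; infer_instance

def pvWitness_compute_aperiodic_len : Int × Int × Int := (5, 3, 7)

def Spec_compute_aperiodic_len (u0 : Int) (m : Int) (p : Int) (out : Int × Int) : Prop := out = compute_aperiodic_len_alt u0 m p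
instance (u0 : Int) (m : Int) (p : Int) (out : Int × Int) : Decidable (Spec_compute_aperiodic_len u0 m p out) := by unfold Spec_compute_aperiodic_len; infer_instance

-- ===== CLAIM (what is proved, stated in full; the proofs are below) =====
def Claim_equal_compute_aperiodic_len : Prop := ∀ (u0 : Int) (m : Int) (p : Int), Dom_compute_aperiodic_len u0 m p → Pre_compute_aperiodic_len u0 m p → Spec_compute_aperiodic_len u0 m p (compute_aperiodic_len u0 m p)

-- ===== LEMMAS AND PROOFS =====

-- the iterated sequence u0, step(u0), step²(u0), …
def seqf (u0 : Int) (m : Int) (p : Int) : Nat → Int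
  | 0 => u0
  | n+1 => get_next (seqf u0 m p n) m p

lemma seqf_succ (u0 m p : Int) (n : Nat) :
    seqf u0 m p (n+1) = get_next (seqf u0 m p n) m p := rfl

lemma get_next_mem (m p : Int) (hp : p ≠ 0) (x : Int) :
    get_next x m p ∈ Finset.Ico (if 0 < p then 0 else p+1) (if 0 < p then p else 1) := by
  rcases lt_or_gt_of_ne hp with h | h
  · have hb := PySem.Int.mod_neg_bounds (x * m) h
    simp only [if_neg (not_lt.mpr h.le), Finset.mem_Ico, get_next]
    omega
  · have h1 := PySem.Int.mod_nonneg (x * m) h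
    have h2 := PySem.Int.mod_lt (x * m) h
    simp only [if_pos h, Finset.mem_Ico, get_next]
    omega

lemma exists_early_rep (u0 m p : Int) (hp : p ≠ 0) :
    ∃ j, j ≤ p.natAbs + 1 ∧ ∃ i, i < j ∧ seqf u0 m p i = seqf u0 m p j := by
  classical
  have hcard : (Finset.Ico (if 0 < p then 0 else p+1) (if 0 < p then p else 1)).card = p.natAbs := by
    rw [Int.card_Ico]
    rcases lt_or_gt_of_ne hp with h | h
    · simp only [if_neg (not_lt.mpr h.le)]; omega
    · simp only [if_pos h]; omega
  obtain ⟨a, ha, b, hb, hab, heq⟩ :=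
    Finset.exists_ne_map_eq_of_card_lt_of_maps_to
      (s := Finset.range (p.natAbs + 1))
      (t := Finset.Ico (if 0 < p then 0 else p+1) (if 0 < p then p else 1))
      (f := fun i => seqf u0 m p (i+1))
      (by simp [hcard])
      (by intro i _; simpa [seqf_succ] using get_next_mem m p hp (seqf u0 m p i))
  simp only [Finset.mem_range] at ha hb
  rcases Nat.lt_or_ge a b with h | h
  · exact ⟨b+1, by omega, a+1, by omega, heq⟩
  · exact ⟨a+1, by omega, b+1, by omega, heq.symm⟩

lemma orbit_structure (u0 m p : Int) (hp : p ≠ 0) :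
    ∃ T μ L : Nat, μ + L = T ∧ 0 < L ∧ T ≤ p.natAbs + 1 ∧
      (∀ i j, i < j → j < T → seqf u0 m p i ≠ seqf u0 m p j) ∧
      seqf u0 m p T = seqf u0 m p μ := by
  classical
  have hex : ∃ n, ∃ i, i < n ∧ seqf u0 m p i = seqf u0 m p n := by
    obtain ⟨j, _, i, hij, he⟩ := exists_early_rep u0 m p hp
    exact ⟨j, i, hij, he⟩
  obtain ⟨μ, hμT, hTμ⟩ := Nat.find_spec hex
  refine ⟨Nat.find hex, μ, Nat.find hex - μ, by omega, by omega, ?_, ?_, hTμ.symm⟩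
  · obtain ⟨j, hj, i, hij, he⟩ := exists_early_rep u0 m p hp
    exact le_trans (Nat.find_min' hex ⟨i, hij, he⟩) hj
  · intro i j hij hjT heq
    exact (Nat.find_min hex hjT) ⟨i, hij, heq⟩

lemma seq_period (u0 m p : Int) (T μ L : Nat) (hL : μ + L = T)
    (hTμ : seqf u0 m p T = seqf u0 m p μ) :
    ∀ n, μ ≤ n → seqf u0 m p (n + L) = seqf u0 m p n := by
  intro n hn
  induction n, hn using Nat.le_induction with
  | base => rw [show μ + L = T from hL, hTμ]
  | succ n hn ih =>
    rw [show n + 1 + L = (n + L) + 1 by omega, seqf_succ, ih, ← seqf_succ]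

lemma seq_period_mult (u0 m p : Int) (T μ L : Nat) (hL : μ + L = T)
    (hTμ : seqf u0 m p T = seqf u0 m p μ) :
    ∀ k n, μ ≤ n → seqf u0 m p (n + k * L) = seqf u0 m p n := by
  intro k
  induction k with
  | zero => simp
  | succ k ih =>
    intro n hn
    rw [show n + (k+1) * L = (n + k * L) + L by ring,
        seq_period u0 m p T μ L hL hTμ _ (by omega), ih n hn]

lemma seq_canon (u0 m p : Int) (T μ L : Nat) (hL : μ + L = T) (hL0 : 0 < L)
    (hTμ : seqf u0 m p T = seqf u0 m p μ)
    (n : Nat) (hn : μ ≤ n) :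
    seqf u0 m p n = seqf u0 m p (μ + (n - μ) % L) ∧ μ + (n - μ) % L < T := by
  have hdm := Nat.mod_add_div' (n - μ) L
  have hmlt := Nat.mod_lt (n - μ) hL0
  constructor
  · conv_lhs => rw [show n = (μ + (n - μ) % L) + ((n - μ) / L) * L by omega]
    exact seq_period_mult u0 m p T μ L hL hTμ _ _ (by omega)
  · omega

lemma seq_char (u0 m p : Int) (T μ L : Nat) (hL : μ + L = T) (hL0 : 0 < L)
    (hinj : ∀ i j, i < j → j < T → seqf u0 m p i ≠ seqf u0 m p j)
    (hTμ : seqf u0 m p T = seqf u0 m p μ)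
    (a b : Nat) (hab : a < b) (heq : seqf u0 m p a = seqf u0 m p b) :
    μ ≤ a ∧ (b - a) % L = 0 := by
  have ha : μ ≤ a := by
    by_contra h
    push_neg at h
    by_cases hb : b < T
    · exact hinj a b hab hb heq
    · have hbμ : μ ≤ b := by omega
      obtain ⟨hcb, hlt⟩ := seq_canon u0 m p T μ L hL hL0 hTμ b hbμ
      exact hinj a (μ + (b - μ) % L) (by omega) hlt (heq.trans hcb)
  have hbμ : μ ≤ b := by omega
  obtain ⟨hca, hlta⟩ := seq_canon u0 m p T μ L hL hL0 hTμ a ha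
  obtain ⟨hcb, hltb⟩ := seq_canon u0 m p T μ L hL hL0 hTμ b hbμ
  have hre : (a - μ) % L = (b - μ) % L := by
    by_contra hne
    rcases Nat.lt_or_ge ((a - μ) % L) ((b - μ) % L) with h | h
    · exact hinj _ _ (by omega) hltb (hca.symm.trans (heq.trans hcb)) 
    · exact hinj _ _ (by omega) hlta (hcb.symm.trans (heq.symm.trans hca))
  refine ⟨ha, ?_⟩
  have hda := Nat.mod_add_div' (a - μ) L
  have hdb := Nat.mod_add_div' (b - μ) L
  have hba : b - a = ((b - μ) / L - (a - μ) / L) * L := by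
    rw [Nat.sub_mul]; omega
  rw [hba]
  exact Nat.mul_mod_left _ _

-- ===== A-side: the dict loop returns (L, T) =====
lemma aLoop_run (u0 m p : Int) (T μ L : Nat) (hL : μ + L = T) (hL0 : 0 < L)
    (hinj : ∀ i j, i < j → j < T → seqf u0 m p i ≠ seqf u0 m p j)
    (hTμ : seqf u0 m p T = seqf u0 m p μ) :
    ∀ fuel k d, k ≤ T → T - k < fuel →
      (∀ x, d.contains x = true ↔ ∃ i, i < k ∧ seqf u0 m p i = x) →
      (∀ i, i < k → d.getD (seqf u0 m p i) 0 = (i : Int)) →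
      d.size = k →
      aLoop m p fuel d (k : Int) (seqf u0 m p k) = ((L : Int), (T : Int)) := by
  intro fuel
  induction fuel with
  | zero => intro k d hk hf _ _ _; omega
  | succ f ih =>
    intro k d hk hf hc hg hs
    by_cases hkT : k < T
    · have hcf : d.contains (seqf u0 m p k) = false := by
        by_contra h
        have ht : d.contains (seqf u0 m p k) = true := by
          cases hcc : d.contains (seqf u0 m p k)
          · exact absurd hcc h
          · rfl
        obtain ⟨i, hik, he⟩ := (hc _).mp ht
        exact hinj i k hik hkT he
      simp only [aLoop, hcf, if_pos]
      have := ih (k+1) (d.insert (seqf u0 m p k) (k : Int)) (by omega) (by omega)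
        (by
          intro x
          rw [PySem.Dict.contains_insert]
          simp only [Bool.or_eq_true, beq_iff_eq, hc]
          constructor
          · rintro (h | ⟨i, hik, he⟩)
            · exact ⟨k, by omega, h.symm⟩
            · exact ⟨i, by omega, he⟩
          · rintro ⟨i, hik, he⟩
            by_cases hik' : i < k
            · exact Or.inr ⟨i, hik', he⟩
            · left; have : i = k := by omega
              rw [← he, this])
        (by
          intro i hik
          rw [PySem.Dict.getD_insert]
          by_cases hik' : i < k
          · rw [if_neg (hinj i k hik' hkT), hg i hik']
          · have : i = k := by omega
            subst this; rw [if_pos rfl])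
        (by
          rw [PySem.Dict.size_insert, hcf]
          simp [hs])
      have hidx : (k : Int) + 1 = ((k + 1 : Nat) : Int) := by push_cast; ring
      have hu : get_next (seqf u0 m p k) m p = seqf u0 m p (k + 1) := rfl
      rw [hidx, hu]
      exact this
    · have hkT' : k = T := by omega
      subst hkT'
      have hct : d.contains (seqf u0 m p k) = true :=
        (hc _).mpr ⟨μ, by omega, hTμ.symm⟩
      simp only [aLoop, hct]
      simp only [Bool.true_eq_false, if_false]
      have hgT : d.getD (seqf u0 m p k) 0 = (μ : Int) := by
        rw [hTμ]; exact hg μ (by omega)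
      rw [hgT, hs]
      have h1 : ((k : Nat) : Int) - (μ : Int) = (L : Int) := by push_cast; omega
      rw [h1]

-- ===== B-side: Floyd's phases =====
lemma floydMeet_run (u0 m p : Int) (M : Nat) (hM0 : 0 < M)
    (hMeq : seqf u0 m p M = seqf u0 m p (2 * M))
    (hMmin : ∀ i, 0 < i → i < M → seqf u0 m p i ≠ seqf u0 m p (2 * i)) :
    ∀ fuel i, 0 < i → i ≤ M → M - i < fuel →
      floydMeet m p fuel (seqf u0 m p i) (seqf u0 m p (2 * i)) = seqf u0 m p M := by
  intro fuel
  induction fuel with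
  | zero => intro i _ _ hf; omega
  | succ f ih =>
    intro i hi0 hiM hf
    by_cases hiM' : i = M
    · subst hiM'
      simp only [floydMeet, ne_eq, hMeq, not_true_eq_false, if_false]
    · have hlt : i < M := by omega
      have hne : seqf u0 m p i ≠ seqf u0 m p (2 * i) := hMmin i hi0 hlt
      simp only [floydMeet, ne_eq, hne, not_false_eq_true, if_true]
      have h1 : get_next (seqf u0 m p i) m p = seqf u0 m p (i + 1) := rfl
      have h2 : get_next (get_next (seqf u0 m p (2 * i)) m p) m p = seqf u0 m p (2 * (i + 1)) := by
        rw [show 2 * (i + 1) = 2 * i + 1 + 1 by ring]; rfl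
      rw [h1, h2]
      exact ih (i + 1) (by omega) (by omega) (by omega)

lemma tailLoop_run (u0 m p : Int) (T μ L M : Nat) (hL : μ + L = T) (hL0 : 0 < L)
    (hinj : ∀ i j, i < j → j < T → seqf u0 m p i ≠ seqf u0 m p j)
    (hTμ : seqf u0 m p T = seqf u0 m p μ)
    (hM0 : 0 < M) (hMmod : M % L = 0) :
    ∀ fuel t, t ≤ μ → μ - t < fuel →
      tailLoop m p fuel (t : Int) (seqf u0 m p t) (seqf u0 m p (M + t)) = ((μ : Int), seqf u0 m p μ) := by
  intro fuel
  induction fuel with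
  | zero => intro t _ hf; omega
  | succ f ih =>
    intro t ht hf
    by_cases htμ : t = μ
    · subst htμ
      have heq : seqf u0 m p (M + t) = seqf u0 m p t := by
        have hdm := Nat.mod_add_div' M L
        rw [show M + t = t + (M / L) * L by omega]
        exact seq_period_mult u0 m p T t L hL hTμ _ _ le_rfl
      simp only [tailLoop, ne_eq, heq, not_true_eq_false, if_false]
    · have hlt : t < μ := by omega
      have hne : seqf u0 m p t ≠ seqf u0 m p (M + t) := by
        intro he
        have := seq_char u0 m p T μ L hL hL0 hinj hTμ t (M + t) (by omega) he
        omega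
      simp only [tailLoop, ne_eq, hne, not_false_eq_true, if_true]
      have h1 : get_next (seqf u0 m p t) m p = seqf u0 m p (t + 1) := rfl
      have h2 : get_next (seqf u0 m p (M + t)) m p = seqf u0 m p (M + (t + 1)) := rfl
      have h3 : (t : Int) + 1 = ((t + 1 : Nat) : Int) := by push_cast; ring
      rw [h1, h2, h3]
      exact ih (t + 1) (by omega) (by omega)

lemma cycLoop_run (u0 m p : Int) (T μ L : Nat) (hL : μ + L = T) (hL0 : 0 < L)
    (hinj : ∀ i j, i < j → j < T → seqf u0 m p i ≠ seqf u0 m p j)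
    (hTμ : seqf u0 m p T = seqf u0 m p μ) :
    ∀ fuel k, 0 < k → k ≤ L → L - k < fuel →
      cycLoop m p fuel (k : Int) (seqf u0 m p μ) (seqf u0 m p (μ + k)) = (L : Int) := by
  intro fuel
  induction fuel with
  | zero => intro k _ _ hf; omega
  | succ f ih =>
    intro k hk0 hkL hf
    by_cases hkL' : k = L
    · subst hkL'
      have heq : seqf u0 m p μ = seqf u0 m p (μ + k) :=
        (seq_period u0 m p T μ k hL hTμ μ le_rfl).symm
      simp only [cycLoop, ne_eq, heq, not_true_eq_false, if_false]
    · have hlt : k < L := by omega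
      have hne : seqf u0 m p μ ≠ seqf u0 m p (μ + k) := by
        intro he
        have h := seq_char u0 m p T μ L hL hL0 hinj hTμ μ (μ + k) (by omega) he
        have : (μ + k - μ) = k := by omega
        rw [this] at h
        have := Nat.mod_eq_of_lt hlt
        omega
      simp only [cycLoop, ne_eq, hne, not_false_eq_true, if_true]
      have h2 : get_next (seqf u0 m p (μ + k)) m p = seqf u0 m p (μ + (k + 1)) := rfl
      have h3 : (k : Int) + 1 = ((k + 1 : Nat) : Int) := by push_cast; ring
      rw [h2, h3]
      exact ih (k + 1) (by omega) (by omega) (by omega)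

-- existence of a Floyd meeting point within T steps
lemma meet_exists (u0 m p : Int) (T μ L : Nat) (hL : μ + L = T) (hL0 : 0 < L)
    (hTμ : seqf u0 m p T = seqf u0 m p μ) :
    ∃ c, 0 < c ∧ c ≤ T ∧ seqf u0 m p c = seqf u0 m p (2 * c) := by
  set c := (max μ 1 + L - 1) / L * L with hc
  have hdm := Nat.mod_add_div' (max μ 1 + L - 1) L
  have hmlt := Nat.mod_lt (max μ 1 + L - 1) hL0
  have hcge : max μ 1 ≤ c := by omega
  have hcle : c ≤ max μ 1 + L - 1 := by omega
  refine ⟨c, by omega, by omega, ?_⟩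
  have : 2 * c = c + ((max μ 1 + L - 1) / L) * L := by omega
  rw [this]
  exact (seq_period_mult u0 m p T μ L hL hTμ _ _ (by omega)).symm

-- ===== VERDICT (by name: the statement is the Claim_ definition above) =====
theorem compute_aperiodic_len_spec : Claim_equal_compute_aperiodic_len := by
  intro u0 m p hDom hp
  unfold Spec_compute_aperiodic_len
  have hp' : p ≠ 0 := hp
  have hpb : p.natAbs ≤ 2147483648 := by
    unfold Dom_compute_aperiodic_len pvDomInt at hDom
    simp only [Bool.and_eq_true, decide_eq_true_eq] at hDom
    omega
  obtain ⟨T, μ, L, hL, hL0, hTb, hinj, hTμ⟩ := orbit_structure u0 m p hp'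
  have hTf : T < pvFuel := by unfold pvFuel; omega
  -- A-side
  have hA : compute_aperiodic_len u0 m p = ((L : Int), (T : Int)) := by
    unfold compute_aperiodic_len
    have := aLoop_run u0 m p T μ L hL hL0 hinj hTμ pvFuel 0 PySem.Dict.empty
      (by omega) (by omega)
      (by intro x; simp [PySem.Dict.contains_empty])
      (by intro i hi; omega)
      (by simp [PySem.Dict.size_empty])
    simpa using this
  -- B-side: the Floyd meeting index M
  classical
  obtain ⟨c, hc0, hcT, hceq⟩ := meet_exists u0 m p T μ L hL hL0 hTμ
  have hexM : ∃ i, 0 < i ∧ seqf u0 m p i = seqf u0 m p (2 * i) := ⟨c, hc0, hceq⟩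
  have hMmin' : ∀ i, i < Nat.find hexM → ¬(0 < i ∧ seqf u0 m p i = seqf u0 m p (2 * i)) :=
    fun i hi => Nat.find_min hexM hi
  have hMle : Nat.find hexM ≤ c := Nat.find_min' hexM ⟨hc0, hceq⟩
  obtain ⟨hM0, hMeq⟩ := Nat.find_spec hexM
  generalize hMg : Nat.find hexM = M at hM0 hMeq hMmin' hMle
  have hMmin : ∀ i, 0 < i → i < M → seqf u0 m p i ≠ seqf u0 m p (2 * i) := by
    intro i hi0 hiM he
    exact hMmin' i hiM ⟨hi0, he⟩
  have hMchar := seq_char u0 m p T μ L hL hL0 hinj hTμ M (2 * M) (by omega) hMeq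
  have hMmod : M % L = 0 := by
    have h2M : 2 * M - M = M := by omega
    rw [h2M] at hMchar
    exact hMchar.2
  have hμM : μ ≤ M := hMchar.1
  have hB : compute_aperiodic_len_alt u0 m p = ((L : Int), (μ : Int) + (L : Int)) := by
    have e1 : get_next u0 m p = seqf u0 m p 1 := rfl
    have e2 : get_next (seqf u0 m p 1) m p = seqf u0 m p (2 * 1) := rfl
    have hmeet : floydMeet m p pvFuel (seqf u0 m p 1) (seqf u0 m p (2 * 1)) = seqf u0 m p M :=
      floydMeet_run u0 m p M hM0 hMeq hMmin pvFuel 1 (by omega) (by omega) (by unfold pvFuel; omega)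
    have htail0 : tailLoop m p pvFuel 0 u0 (seqf u0 m p M) = ((μ : Int), seqf u0 m p μ) := by
      have h := tailLoop_run u0 m p T μ L M hL hL0 hinj hTμ hM0 hMmod pvFuel 0 (by omega) (by unfold pvFuel; omega)
      simpa [show seqf u0 m p 0 = u0 from rfl] using h
    have hcyc0 : cycLoop m p pvFuel 1 (seqf u0 m p μ) (get_next (seqf u0 m p μ) m p) = (L : Int) := by
      have h := cycLoop_run u0 m p T μ L hL hL0 hinj hTμ pvFuel 1 (by omega) (by omega) (by unfold pvFuel; omega)
      simpa [show seqf u0 m p (μ + 1) = get_next (seqf u0 m p μ) m p from rfl] using h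
    simp only [compute_aperiodic_len_alt]
    rw [e1, e2, hmeet, htail0]
    simp [hcyc0]
  rw [hA, hB]
  have hTcast : (μ : Int) + (L : Int) = (T : Int) := by push_cast; omega
  rw [hTcast]
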